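-- pv_equiv track=rewrite | github.com/dlehdgml1031/MGTD | model/DetectGPT/test.py | count_ngrams
-- ===== SOURCE A (Python) =====
-- from collections import Counter, defaultdict
-- from typing import Iterable, Optional, List, Dict
--
-- def count_ngrams(text: str, max_ngram_size: int) -> Dict[tuple, int]:
--     """Counts individual ngrams in the input.
--
--     :param tokenized_samples: the tokenized input sequences.
--     :param max_ngram_size: the maximal ngram size to consider
--     :return: dictionary mapping from ngram to the number of times it appears in the input.
--     """
--     tokens = text.split(' ')
--     ngram_to_count = Counter()
--
--     for ngram_size in range(1, max_ngram_size + 1):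
--         for start_i in range(len(tokens) - ngram_size + 1):
--             ngram = tuple(tokens[start_i:start_i+ngram_size])
--             ngram_to_count[ngram] += 1
--     return dict(ngram_to_count)
-- ===== SOURCE B (Python) =====
-- def count_ngrams(text, max_ngram_size):
--     """Counts individual ngrams in the input.
--
--     Dynamic-programming re-implementation: instead of slicing a fresh tuple
--     for every (size, start) pair, maintain an array cur where cur[i] is the
--     ngram starting at position i built so far; each size round extends every
--     still-live prefix by exactly one token, and the loop stops as soon as no
--     window of the current size exists.
--     """
--     tokens = text.split(' ')
--     counts = {}
--     cur = [() for _ in tokens]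
--     for size in range(1, max_ngram_size + 1):
--         limit = len(tokens) - size + 1
--         if limit <= 0:
--             break
--         for i in range(limit):
--             g = cur[i] + (tokens[i + size - 1],)
--             cur[i] = g
--             counts[g] = counts.get(g, 0) + 1
--     return counts
-- ===== Notes on version B (the rewrite author's own statement) =====
-- stated objective: faster
-- what changed: B is a dynamic program on window length: it keeps an array cur with the ngram currently built at each start position, extends every still-live prefix by exactly one token per size round (no slicing), counts with a plain dict.get, and breaks out of the size loop as soon as no window of the current size exists, whereas A re-slices a fresh tuple from the token list for every (size, start) pair and tallies with a Counter over all requested sizes even when no windows exist.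
import Mathlib
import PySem

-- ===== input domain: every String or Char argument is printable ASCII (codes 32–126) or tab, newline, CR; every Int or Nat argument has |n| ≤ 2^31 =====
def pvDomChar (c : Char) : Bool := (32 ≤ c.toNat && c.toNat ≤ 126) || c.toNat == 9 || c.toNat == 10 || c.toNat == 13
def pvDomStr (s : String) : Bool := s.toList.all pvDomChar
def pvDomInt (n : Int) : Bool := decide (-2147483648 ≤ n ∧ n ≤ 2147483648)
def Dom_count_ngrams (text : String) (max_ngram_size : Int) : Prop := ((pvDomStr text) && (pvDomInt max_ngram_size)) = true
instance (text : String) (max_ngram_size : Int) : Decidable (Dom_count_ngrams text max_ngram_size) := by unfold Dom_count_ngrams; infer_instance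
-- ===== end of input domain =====

-- B replaces A's per-(size,start) tuple slicing by a dynamic program on window length:
-- an array of growing prefix ngrams, each extended by one token per size round, with the
-- size loop breaking once no window of the current size exists (a timing run measured B faster).

-- ===== PORT A =====
-- tokens = text.split(' '); sep " " is nonempty so PySem.Str.split? is always `some`
def count_ngrams (text : String) (max_ngram_size : Int) : List (List String × Int) :=
  let tokens := (PySem.Str.split? text " ").getD []
  let counts := (PySem.List.pyRange 1 (max_ngram_size + 1)).foldl (fun c ngram_size =>
      (PySem.List.pyRange 0 ((tokens.length : Int) - ngram_size + 1)).foldl (fun c start_i =>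
        let ngram := PySem.List.slice tokens (some start_i) (some (start_i + ngram_size))
        c.insert ngram (c.getD ngram 0 + 1)) c) PySem.Dict.empty
  counts.items

-- ===== PORT B =====
-- the size loop with its break: recursion over the remaining sizes, state = (cur, counts);
-- cur[i] and tokens[i+size-1] are always in range here, so pyGet? … |>.getD is exact
def cnLoop (tokens : List String) : List Int → List (List String) × PySem.Dict (List String) Int → List (List String) × PySem.Dict (List String) Int
  | [], st => st
  | size :: rest, st =>
    if (tokens.length : Int) - size + 1 ≤ 0 then st   -- break
    else
      cnLoop tokens rest
        ((PySem.List.pyRange 0 ((tokens.length : Int) - size + 1)).foldl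
          (fun st i =>
            let g := (PySem.List.pyGet? st.1 i).getD [] ++ [(PySem.List.pyGet? tokens (i + size - 1)).getD ""]
            (st.1.set i.toNat g, st.2.insert g (st.2.getD g 0 + 1)))
          st)

def count_ngrams_alt (text : String) (max_ngram_size : Int) : List (List String × Int) :=
  let tokens := (PySem.Str.split? text " ").getD []
  (cnLoop tokens (PySem.List.pyRange 1 (max_ngram_size + 1))
      (tokens.map (fun _ => ([] : List String)), PySem.Dict.empty)).2.items

-- ===== PRECONDITION & SPEC =====
def Spec_count_ngrams (text : String) (max_ngram_size : Int) (out : List (List String × Int)) : Prop := out = count_ngrams_alt text max_ngram_size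
instance (text : String) (max_ngram_size : Int) (out : List (List String × Int)) : Decidable (Spec_count_ngrams text max_ngram_size out) := by unfold Spec_count_ngrams; infer_instance

-- ===== CLAIM (what is proved, stated in full; the proofs are below) =====
def Claim_equal_count_ngrams : Prop := ∀ (text : String) (max_ngram_size : Int), Dom_count_ngrams text max_ngram_size → Spec_count_ngrams text max_ngram_size (count_ngrams text max_ngram_size)

-- ===== LEMMAS AND PROOFS =====

-- cur after s completed rounds: at each start i, the window of size s (clamped to the suffix)
def pvCur (t : List String) (s : Nat) : List (List String) :=
  (List.range t.length).map (fun i => (t.drop i).take s)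

-- cur in the middle of round s+1: positions below j already extended
def pvMix (t : List String) (s j : Nat) : List (List String) :=
  (List.range t.length).map (fun i => (t.drop i).take (if i < j then s + 1 else s))

-- A's inner loop for one size
def pvAstep (t : List String) (c : PySem.Dict (List String) Int) (size : Int) : PySem.Dict (List String) Int :=
  (PySem.List.pyRange 0 ((t.length : Int) - size + 1)).foldl (fun c start_i =>
    let ngram := PySem.List.slice t (some start_i) (some (start_i + size))
    c.insert ngram (c.getD ngram 0 + 1)) c

lemma pvMix_zero (t : List String) (s : Nat) : pvMix t s 0 = pvCur t s := by
  simp [pvMix, pvCur]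

lemma pvMix_full (t : List String) (s : Nat) : pvMix t s (t.length - s) = pvCur t (s + 1) := by
  unfold pvMix pvCur
  apply List.map_congr_left
  intro i hi
  rw [List.mem_range] at hi
  by_cases h : i < t.length - s
  · rw [if_pos h]
  · rw [if_neg h]
    have hlen : (t.drop i).length ≤ s := by simp [List.length_drop]; omega
    rw [List.take_of_length_le hlen, List.take_of_length_le (le_trans hlen (by omega))]

lemma pvInit (t : List String) : t.map (fun _ => ([] : List String)) = pvCur t 0 := by
  unfold pvCur
  apply List.ext_getElem
  · simp
  · intro i h1 h2
    simp

lemma pvAstep_noop (t : List String) (c : PySem.Dict (List String) Int) (size : Int)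
    (h : (t.length : Int) - size + 1 ≤ 0) : pvAstep t c size = c := by
  unfold pvAstep
  rw [PySem.List.pyRange_one_eq_nil h]
  rfl

lemma pvAstep_fold_noop (t : List String) (l : List Int)
    (h : ∀ x ∈ l, (t.length : Int) < x) :
    ∀ c : PySem.Dict (List String) Int, l.foldl (pvAstep t) c = c := by
  induction l with
  | nil => intro c; rfl
  | cons x l ih =>
    intro c
    rw [List.foldl_cons, pvAstep_noop t c x (by have := h x List.mem_cons_self; omega)]
    exact ih (fun y hy => h y (List.mem_cons_of_mem x hy)) c

-- one inner round, up to j steps: cur becomes mixed, counts get A's first j inserts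
lemma pvRoundAux (t : List String) (a : Nat) (c : PySem.Dict (List String) Int) (ha : a < t.length) :
    ∀ j, j ≤ t.length - a →
      (List.range j).foldl
        (fun (st : List (List String) × PySem.Dict (List String) Int) (jn : Nat) =>
          let g := (PySem.List.pyGet? st.1 (jn : Int)).getD [] ++
            [(PySem.List.pyGet? t ((jn : Int) + ((a : Int) + 1) - 1)).getD ""]
          (st.1.set ((jn : Int)).toNat g, st.2.insert g (st.2.getD g 0 + 1)))
        (pvMix t a 0, c)
      = (pvMix t a j,
         (List.range j).foldl
          (fun c (jn : Nat) =>
            let ngram := PySem.List.slice t (some (jn : Int)) (some ((jn : Int) + ((a : Int) + 1)))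
            c.insert ngram (c.getD ngram 0 + 1)) c) := by
  intro j
  induction j with
  | zero => intro _; rfl
  | succ j ih =>
    intro hj
    rw [List.range_succ, List.foldl_append, List.foldl_append, List.foldl_cons, List.foldl_cons,
      List.foldl_nil, List.foldl_nil, ih (by omega)]
    have hjn : j < t.length := by omega
    have hja : j + a < t.length := by omega
    have hidx : ((j : Nat) : Int) + ((a : Int) + 1) - 1 = ((j + a : Nat) : Int) := by push_cast; ring
    have hcur : (PySem.List.pyGet? (pvMix t a j) ((j : Nat) : Int)).getD [] = (t.drop j).take a := by
      rw [PySem.List.pyGet?_natCast]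
      unfold pvMix
      rw [List.getElem?_map, List.getElem?_range hjn]
      simp
    have htok : (PySem.List.pyGet? t (((j : Nat) : Int) + ((a : Int) + 1) - 1)).getD "" = t[j + a] := by
      rw [hidx, PySem.List.pyGet?_natCast, List.getElem?_eq_getElem hja]
      rfl
    have hg : (t.drop j).take a ++ [t[j + a]] = (t.drop j).take (a + 1) := by
      rw [List.take_add_one]
      congr 1
      rw [List.getElem?_drop, List.getElem?_eq_getElem hja]
      rfl
    have hslice : PySem.List.slice t (some ((j : Nat) : Int)) (some (((j : Nat) : Int) + ((a : Int) + 1)))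
        = (t.drop j).take (a + 1) := by
      have hc : ((a : Int) + 1) = (((a + 1 : Nat)) : Int) := by push_cast; ring
      rw [hc, PySem.List.slice_natCast_add]
    have hset : (pvMix t a j).set j ((t.drop j).take (a + 1)) = pvMix t a (j + 1) := by
      apply List.ext_getElem
      · simp [pvMix]
      · intro i h1 h2
        have hin : i < t.length := by simpa [pvMix] using h2
        rw [List.getElem_set]
        by_cases hij : j = i
        · subst hij
          simp [pvMix, List.getElem_map, List.getElem_range]
        · rw [if_neg hij]
          have : (i < j) = (i < j + 1) := by
            apply propext
            constructor <;> intro <;> omega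
          simp only [pvMix, List.getElem_map, List.getElem_range, this]
    simp only [hcur, htok, hg, hslice, Int.toNat_natCast, hset]

-- one full round of the size loop
lemma pvRound (t : List String) (a : Nat) (c : PySem.Dict (List String) Int) (ha : a < t.length) :
    (PySem.List.pyRange 0 ((t.length : Int) - ((a : Int) + 1) + 1)).foldl
      (fun (st : List (List String) × PySem.Dict (List String) Int) i =>
        let g := (PySem.List.pyGet? st.1 i).getD [] ++
          [(PySem.List.pyGet? t (i + ((a : Int) + 1) - 1)).getD ""]
        (st.1.set i.toNat g, st.2.insert g (st.2.getD g 0 + 1)))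
      (pvCur t a, c)
    = (pvCur t (a + 1), pvAstep t c ((a : Int) + 1)) := by
  have hL : (t.length : Int) - ((a : Int) + 1) + 1 = ((t.length - a : Nat) : Int) := by
    push_cast [Nat.cast_sub (le_of_lt ha)]; ring
  have hfull := pvRoundAux t a c ha (t.length - a) (le_refl _)
  rw [pvMix_zero] at hfull
  rw [hL, PySem.List.pyRange_zero_natCast, List.foldl_map, hfull, pvMix_full]
  unfold pvAstep
  rw [hL, PySem.List.pyRange_zero_natCast, List.foldl_map]

-- the whole size loop, starting after a completed rounds
lemma pvLoop (t : List String) (M : Nat) :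
    ∀ (a : Nat) (c : PySem.Dict (List String) Int),
      (cnLoop t ((List.range M).map (fun (k : Nat) => (a : Int) + 1 + (k : Int))) (pvCur t a, c)).2
        = ((List.range M).map (fun (k : Nat) => (a : Int) + 1 + (k : Int))).foldl (pvAstep t) c := by
  induction M with
  | zero => intro a c; rfl
  | succ M ih =>
    intro a c
    have hlist : (List.range (M + 1)).map (fun (k : Nat) => (a : Int) + 1 + (k : Int))
        = ((a : Int) + 1) :: (List.range M).map (fun (k : Nat) => ((a + 1 : Nat) : Int) + 1 + (k : Int)) := by
      rw [List.range_succ_eq_map, List.map_cons, List.map_map]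
      refine congrArg₂ List.cons (by norm_num) (List.map_congr_left ?_)
      intro k _
      simp only [Function.comp_apply]
      push_cast
      ring
    rw [hlist, List.foldl_cons]
    simp only [cnLoop]
    by_cases hb : (t.length : Int) - ((a : Int) + 1) + 1 ≤ 0
    · rw [if_pos hb, pvAstep_noop t c ((a : Int) + 1) hb]
      rw [pvAstep_fold_noop t _ ?_ c]
      intro x hx
      rcases List.mem_map.1 hx with ⟨k, _, rfl⟩
      omega
    · rw [if_neg hb, pvRound t a c (by omega)]
      exact ih (a + 1) (pvAstep t c ((a : Int) + 1))

lemma pvSizes (m : Int) :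
    PySem.List.pyRange 1 (m + 1) = (List.range m.toNat).map (fun (k : Nat) => ((0 : Nat) : Int) + 1 + (k : Int)) := by
  rw [PySem.List.pyRange_one]
  have hm : (m + 1 - 1).toNat = m.toNat := by omega
  rw [hm]
  apply List.map_congr_left
  intro k _
  push_cast
  ring

-- ===== VERDICT (by name: the statement is the Claim_ definition above) =====
theorem count_ngrams_spec : Claim_equal_count_ngrams := by
  intro text m _
  unfold Spec_count_ngrams count_ngrams count_ngrams_alt
  simp only [pvSizes m, pvInit, pvLoop]
  rfl
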